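-- pv_equiv track=rewrite | github.com/EmilianoVF/Curso_UNSAM | Clase 3/propaga.py | propaga2
-- ===== SOURCE A (Python) =====
-- def propaga2(lista):
--     for i in range(1,len(lista)):
--         if lista[i-1]==1 and lista[i]!=-1:
--             lista[i]=1
--     lista=lista[::-1]
--     for i in range(1,len(lista)):
--         if lista[i-1]==1 and lista[i]!=-1:
--             lista[i]=1
--
--     return lista[::-1]
-- ===== SOURCE B (Python) =====
-- def propaga2(lista):
--     # same in-place forward pass as the original (keeps the argument's observable mutation)
--     for i in range(1, len(lista)):
--         if lista[i-1] == 1 and lista[i] != -1: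
--             lista[i] = 1
--     # instead of reverse+forward+reverse: split on -1 barriers and fill any segment containing a 1
--     out = []
--     seg = []
--     for x in lista:
--         if x == -1:
--             out.extend([1] * len(seg) if 1 in seg else seg)
--             out.append(-1)
--             seg = []
--         else:
--             seg.append(x)
--     out.extend([1] * len(seg) if 1 in seg else seg)
--     return out
-- ===== Notes on version B (the rewrite author's own statement) =====
-- stated objective: alternative
-- what changed: Replaces the reverse + second forward pass + reverse backward sweep with a single barrier-grouping pass: after the same in-place forward pass (kept for the argument's observable mutation), the list is split at -1 barriers and any segment containing a 1 is filled with 1s.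
import Mathlib
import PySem

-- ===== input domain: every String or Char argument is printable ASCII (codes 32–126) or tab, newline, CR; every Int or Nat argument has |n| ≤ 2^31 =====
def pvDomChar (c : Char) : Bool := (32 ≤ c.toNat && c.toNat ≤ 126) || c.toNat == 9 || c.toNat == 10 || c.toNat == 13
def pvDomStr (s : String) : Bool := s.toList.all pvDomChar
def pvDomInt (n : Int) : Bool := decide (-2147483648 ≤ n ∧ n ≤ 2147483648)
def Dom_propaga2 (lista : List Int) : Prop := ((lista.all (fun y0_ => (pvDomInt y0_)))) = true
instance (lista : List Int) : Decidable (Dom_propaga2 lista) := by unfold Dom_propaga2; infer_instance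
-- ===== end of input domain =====

-- B replaces A's reverse+forward+reverse backward sweep with one barrier-grouping fill pass
-- (alternative decomposition, same cost); the in-place forward pass (= the argument mutation
-- the caller can observe) is kept identical, so both sides mutate the argument the same way.
-- The equivalence proved here is about the RETURN value.

-- ===== PORT A =====
-- the `for i in range(1, len(lista)): if lista[i-1]==1 and lista[i]!=-1: lista[i]=1`
-- loop, which appears verbatim in both Pythons (A runs it twice, B once)
def pvFwdPass (l : List Int) : List Int :=
  (PySem.List.pyRange 1 (l.length : Int) 1).foldl
    (fun acc i =>
      if PySem.List.pyGetD acc (i - 1) 0 == 1 && PySem.List.pyGetD acc i 0 != -1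
      then PySem.List.pySetD acc i 1 else acc) l

def propaga2 (lista : List Int) : List Int :=
  let l1 := pvFwdPass lista
  let l2 := (PySem.List.slice? l1 none none (-1)).getD []   -- lista = lista[::-1]
  let l3 := pvFwdPass l2
  (PySem.List.slice? l3 none none (-1)).getD []             -- return lista[::-1]

-- ===== PORT B =====
-- `[1]*len(seg) if 1 in seg else seg`
def pvFlush (seg : List Int) : List Int :=
  if seg.contains 1 then List.replicate seg.length 1 else seg

def propaga2_alt (lista : List Int) : List Int :=
  let l1 := pvFwdPass lista
  let st := l1.foldl
    (fun (acc : List Int × List Int) x =>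
      if x == -1 then (acc.1 ++ pvFlush acc.2 ++ [-1], ([] : List Int))
      else (acc.1, acc.2 ++ [x]))
    (([] : List Int), ([] : List Int))
  st.1 ++ pvFlush st.2

-- ===== PRECONDITION & SPEC =====
def Spec_propaga2 (lista : List Int) (out : List Int) : Prop := out = propaga2_alt lista
instance (lista : List Int) (out : List Int) : Decidable (Spec_propaga2 lista out) := by unfold Spec_propaga2; infer_instance

-- ===== CLAIM (what is proved, stated in full; the proofs are below) =====
def Claim_equal_propaga2 : Prop := ∀ (lista : List Int), Dom_propaga2 lista → Spec_propaga2 lista (propaga2 lista)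

-- ===== LEMMAS AND PROOFS =====

-- clean recursive form of the forward pass: `pvGo p l` propagates with previous value `p`
def pvGo (p : Int) : List Int → List Int
  | [] => []
  | x :: xs => let y := if p == 1 && x != -1 then 1 else x; y :: pvGo y xs

def pvFwd : List Int → List Int
  | [] => []
  | x :: xs => x :: pvGo x xs

-- recursive form of B's segment fill
def pvFill (seg : List Int) : List Int → List Int
  | [] => pvFlush seg
  | x :: xs => if x == -1 then pvFlush seg ++ -1 :: pvFill [] xs else pvFill (seg ++ [x]) xs

theorem length_pvGo (p : Int) (l : List Int) : (pvGo p l).length = l.length := by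
  induction l generalizing p with
  | nil => rfl
  | cons x xs ih => simp [pvGo, ih]

theorem length_pvFwd (l : List Int) : (pvFwd l).length = l.length := by
  cases l with
  | nil => rfl
  | cons x xs => simp [pvFwd, length_pvGo]

theorem pvGo_snoc (p : Int) (s : List Int) (x : Int) :
    pvGo p (s ++ [x]) =
      pvGo p s ++ [if (pvGo p s).getLastD p == 1 && x != -1 then 1 else x] := by
  induction s generalizing p with
  | nil => simp [pvGo]
  | cons y s' ih =>
    simp only [List.cons_append, pvGo, ih, List.getLastD_cons]

theorem pvFwd_snoc (s : List Int) (x : Int) (hs : s ≠ []) :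
    pvFwd (s ++ [x]) =
      pvFwd s ++ [if (pvFwd s).getLastD 0 == 1 && x != -1 then 1 else x] := by
  cases s with
  | nil => exact absurd rfl hs
  | cons h s0 =>
    simp only [List.cons_append, pvFwd, pvGo_snoc, List.getLastD_cons]

theorem getD_len_sub_one : ∀ (t : List Int) (d : Int), t.getD (t.length - 1) d = t.getLastD d := by
  intro t
  induction t with
  | nil => intro d; rfl
  | cons a r ih =>
    intro d
    cases r with
    | nil => rfl
    | cons b r' =>
      simpa [List.getD_cons_succ, List.getLastD_cons, List.length_cons] using ih d

-- the foldl over range(1, len) computes pvFwd, prefix by prefix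
theorem pvFwdPass_inv (l : List Int) :
    ∀ k : Nat, k ≤ l.length →
      ((PySem.List.pyRange 1 (k : Int) 1).foldl
        (fun acc i =>
          if PySem.List.pyGetD acc (i - 1) 0 == 1 && PySem.List.pyGetD acc i 0 != -1
          then PySem.List.pySetD acc i 1 else acc) l)
      = pvFwd (l.take k) ++ l.drop k := by
  intro k
  induction k with
  | zero =>
    intro _
    rw [PySem.List.pyRange_one_eq_nil (by norm_num)]
    simp [pvFwd]
  | succ k ih =>
    intro hk
    have hk' : k ≤ l.length := Nat.le_of_succ_le hk
    have hklt : k < l.length := hk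
    cases Nat.eq_zero_or_pos k with
    | inl h0 =>
      subst h0
      rw [show ((1 : Nat) : Int) = 1 by norm_num,
        PySem.List.pyRange_one_eq_nil (by norm_num)]
      obtain ⟨x, xs, rfl⟩ := List.exists_cons_of_ne_nil (List.ne_nil_of_length_pos hklt)
      simp [pvFwd, pvGo]
    | inr hpos =>
      have hsplit : PySem.List.pyRange 1 ((k + 1 : Nat) : Int) 1
          = PySem.List.pyRange 1 (k : Int) 1 ++ [(k : Int)] := by
        have := PySem.List.pyRange_one_succ_right (a := 1) (b := (k : Int)) (by exact_mod_cast hpos)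
        simpa using this
      rw [hsplit, List.foldl_append, ih hk']
      simp only [List.foldl_cons, List.foldl_nil]
      -- now one step at index k
      set t := pvFwd (l.take k) with ht
      have hlen : t.length = k := by
        rw [ht, length_pvFwd, List.length_take]; omega
      have hgetprev : PySem.List.pyGetD (t ++ l.drop k) ((k : Int) - 1) 0 = t.getLastD 0 := by
        have hcast : ((k : Int) - 1) = ((k - 1 : Nat) : Int) := by omega
        rw [hcast, PySem.List.pyGetD_natCast]
        have hlt : k - 1 < t.length := by omega
        rw [List.getD_eq_getElem?_getD, List.getElem?_append_left hlt,
          ← List.getD_eq_getElem?_getD]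
        have := getD_len_sub_one t 0
        rw [hlen] at this
        exact this
      have hdrop : l.drop k = l[k] :: l.drop (k + 1) := List.drop_eq_getElem_cons hklt
      have hgetcur : PySem.List.pyGetD (t ++ l.drop k) ((k : Int)) 0 = l[k] := by
        rw [PySem.List.pyGetD_natCast, List.getD_eq_getElem?_getD,
          List.getElem?_append_right (le_of_eq hlen), hlen, Nat.sub_self, hdrop]
        rfl
      have htake : l.take (k + 1) = l.take k ++ [l[k]] := by
        rw [List.take_add_one, List.getElem?_eq_getElem hklt]; rfl
      have hne : l.take k ≠ [] := by
        have hlt : (l.take k).length = k := by rw [List.length_take]; omega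
        intro h
        rw [h] at hlt
        simp at hlt
        omega
      have hfwdsucc : pvFwd (l.take (k + 1)) =
          t ++ [if t.getLastD 0 == 1 && l[k] != -1 then 1 else l[k]] := by
        rw [htake, pvFwd_snoc _ _ hne, ht]
      rw [hgetprev, hgetcur, hfwdsucc, hdrop]
      by_cases hc : (t.getLastD 0 == 1 && l[k] != -1) = true
      · rw [if_pos hc, if_pos hc]
        rw [PySem.List.pySetD_natCast]
        rw [List.set_append]
        simp only [hlen, lt_irrefl, if_false, Nat.sub_self]
        rw [List.set_cons_zero]
        simp
      · rw [if_neg hc, if_neg hc]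
        simp

theorem pvFwdPass_eq (l : List Int) : pvFwdPass l = pvFwd l := by
  have := pvFwdPass_inv l l.length (le_refl _)
  simpa [pvFwdPass, List.take_length, List.drop_length] using this

-- A's port, in clean form
theorem propaga2_eq (l : List Int) :
    propaga2 l = (pvFwd ((pvFwd l).reverse)).reverse := by
  simp only [propaga2, pvFwdPass_eq, PySem.List.slice?_none_none_neg_one, Option.getD_some]

-- B's fold computes pvFill
theorem fold_fill (l : List Int) : ∀ (out seg : List Int),
    (l.foldl
      (fun (acc : List Int × List Int) x =>
        if x == -1 then (acc.1 ++ pvFlush acc.2 ++ [-1], ([] : List Int))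
        else (acc.1, acc.2 ++ [x])) (out, seg)).1
    ++ pvFlush (l.foldl
      (fun (acc : List Int × List Int) x =>
        if x == -1 then (acc.1 ++ pvFlush acc.2 ++ [-1], ([] : List Int))
        else (acc.1, acc.2 ++ [x])) (out, seg)).2
    = out ++ pvFill seg l := by
  induction l with
  | nil => intro out seg; simp [pvFill]
  | cons x xs ih =>
    intro out seg
    by_cases hx : (x == (-1 : Int)) = true
    · simp only [List.foldl_cons, if_pos hx, ih, pvFill]
      have hx' : x = -1 := by simpa using hx
      subst hx'
      simp
    · simp only [List.foldl_cons, if_neg hx, ih, pvFill]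

theorem propaga2_alt_eq (l : List Int) : propaga2_alt l = pvFill [] (pvFwd l) := by
  simp only [propaga2_alt, pvFwdPass_eq]
  simpa using fold_fill (pvFwd l) [] []

-- ---- facts about pvGo / pvFwd ----

theorem pvGo_of_ne_one (p : Int) (hp : p ≠ 1) (l : List Int) : pvGo p l = pvFwd l := by
  cases l with
  | nil => rfl
  | cons x xs =>
    have : (p == 1 && x != -1) = false := by
      simp [hp]
    simp [pvGo, pvFwd, this]

theorem pvGo_append_neg_one (A : List Int) : ∀ (p : Int) (B : List Int),
    pvGo p (A ++ -1 :: B) = pvGo p A ++ -1 :: pvFwd B := by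
  induction A with
  | nil =>
    intro p B
    simp [pvGo, pvGo_of_ne_one (-1) (by norm_num) B]
  | cons a A' ih =>
    intro p B
    simp only [List.cons_append, pvGo, ih, List.cons_append]

theorem pvFwd_append_neg_one (A B : List Int) :
    pvFwd (A ++ -1 :: B) = pvFwd A ++ -1 :: pvFwd B := by
  cases A with
  | nil => simp [pvFwd, pvGo_of_ne_one (-1) (by norm_num) B]
  | cons a A' => simp only [List.cons_append, pvFwd, pvGo_append_neg_one]

theorem pvFill_append_neg_one (A : List Int) : ∀ (seg B : List Int), -1 ∉ A →
    pvFill seg (A ++ -1 :: B) = pvFlush (seg ++ A) ++ -1 :: pvFill [] B := by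
  induction A with
  | nil => intro seg B _; simp [pvFill]
  | cons a A' ih =>
    intro seg B hA
    have ha : (a == (-1 : Int)) = false := by
      simp only [List.mem_cons, not_or] at hA
      simp only [beq_eq_false_iff_ne, ne_eq]
      exact fun h => hA.1 h.symm
    simp only [List.cons_append, pvFill, ha, Bool.false_eq_true, if_false]
    rw [ih _ _ (by intro h; exact hA (List.mem_cons_of_mem _ h)), List.append_assoc]
    rfl

theorem pvFill_no_barrier (A : List Int) : ∀ (seg : List Int), -1 ∉ A →
    pvFill seg A = pvFlush (seg ++ A) := by
  induction A with
  | nil => intro seg _; simp [pvFill]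
  | cons a A' ih =>
    intro seg hA
    have ha : (a == (-1 : Int)) = false := by
      simp only [List.mem_cons, not_or] at hA
      simp only [beq_eq_false_iff_ne, ne_eq]
      exact fun h => hA.1 h.symm
    simp only [pvFill, ha, Bool.false_eq_true, if_false]
    rw [ih _ (by intro h; exact hA (List.mem_cons_of_mem _ h)), List.append_assoc]
    rfl

theorem pvGo_of_no_one (l : List Int) : ∀ p : Int, p ≠ 1 → 1 ∉ l → pvGo p l = l := by
  induction l with
  | nil => intro p _ _; rfl
  | cons x xs ih =>
    intro p hp hl
    simp only [List.mem_cons, not_or] at hl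
    have : (p == 1 && x != -1) = false := by simp [hp]
    simp only [pvGo, this, Bool.false_eq_true, if_false]
    rw [ih x (Ne.symm hl.1) hl.2]

theorem pvFwd_of_no_one (l : List Int) (hl : 1 ∉ l) : pvFwd l = l := by
  cases l with
  | nil => rfl
  | cons x xs =>
    simp only [List.mem_cons, not_or] at hl
    simp only [pvFwd]
    rw [pvGo_of_no_one xs x (Ne.symm hl.1) hl.2]

theorem pvGo_one_of_no_barrier (l : List Int) (hl : -1 ∉ l) :
    pvGo 1 l = List.replicate l.length 1 := by
  induction l with
  | nil => rfl
  | cons x xs ih =>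
    simp only [List.mem_cons, not_or] at hl
    have : ((1 : Int) == 1 && x != -1) = true := by simp [Ne.symm hl.1]
    simp only [pvGo, this, if_true, List.length_cons, List.replicate_succ]
    rw [ih hl.2]

theorem not_barrier_pvGo (l : List Int) : ∀ p : Int, -1 ∉ l → -1 ∉ pvGo p l := by
  induction l with
  | nil => intro p _; simp [pvGo]
  | cons x xs ih =>
    intro p hl
    simp only [List.mem_cons, not_or] at hl
    simp only [pvGo, List.mem_cons, not_or]
    constructor
    · by_cases hc : (p == 1 && x != -1) = true
      · simp [hc]
      · simp [hc]; exact fun h => hl.1 h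
    · by_cases hc : (p == 1 && x != -1) = true
      · simp only [hc, if_true]; exact ih 1 hl.2
      · simp only [hc]; exact ih x hl.2

theorem not_barrier_pvFwd (l : List Int) (hl : -1 ∉ l) : -1 ∉ pvFwd l := by
  cases l with
  | nil => simp [pvFwd]
  | cons x xs =>
    simp only [List.mem_cons, not_or] at hl
    simp only [pvFwd, List.mem_cons, not_or]
    exact ⟨hl.1, not_barrier_pvGo xs x hl.2⟩

theorem pvGo_ends_one (l : List Int) : ∀ p : Int, -1 ∉ l → l ≠ [] → (1 ∈ l ∨ p = 1) →
    ∃ t, pvGo p l = t ++ [1] := by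
  induction l with
  | nil => intro p _ h _; exact absurd rfl h
  | cons x xs ih =>
    intro p hl _ hone
    simp only [List.mem_cons, not_or] at hl
    by_cases hxs : xs = []
    · subst hxs
      refine ⟨[], ?_⟩
      rcases hone with h | h
      · have hx1 : x = 1 := by simpa [eq_comm] using h
        subst hx1
        by_cases hp : p = 1 <;> simp [pvGo, hp]
      · subst h; simp [pvGo, Ne.symm hl.1]
    · set y := if p == 1 && x != -1 then 1 else x with hy
      have hnext : 1 ∈ xs ∨ y = 1 := by
        rcases hone with h | h
        · rcases List.mem_cons.mp h with h1 | h1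
          · right
            by_cases hp : p = 1
            · simp [hy, hp, ← h1]
            · simp [hy, hp, ← h1]
          · left; exact h1
        · right; simp [hy, h, Ne.symm hl.1]
      obtain ⟨t, ht⟩ := ih y hl.2 hxs hnext
      refine ⟨y :: t, ?_⟩
      simp only [pvGo]
      rw [← hy, ht]
      rfl

theorem pvFwd_ends_one (A : List Int) (hA : -1 ∉ A) (h1 : 1 ∈ A) :
    ∃ t, pvFwd A = t ++ [1] := by
  cases A with
  | nil => simp at h1
  | cons x xs =>
    simp only [List.mem_cons, not_or] at hA
    by_cases hxs : xs = []
    · subst hxs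
      have hx1 : x = 1 := by simpa [eq_comm] using h1
      exact ⟨[], by simp [pvFwd, pvGo, hx1]⟩
    · have hone : 1 ∈ xs ∨ x = 1 := by
        rcases List.mem_cons.mp h1 with h | h
        · right; exact h.symm
        · left; exact h
      obtain ⟨t, ht⟩ := pvGo_ends_one xs x hA.2 hxs hone
      exact ⟨x :: t, by simp [pvFwd, ht]⟩

-- the key segment lemma: on a barrier-free list the backward sweep equals the fill
theorem segment_lemma (A : List Int) (hA : -1 ∉ A) :
    (pvFwd ((pvFwd A).reverse)).reverse = pvFlush (pvFwd A) := by
  by_cases h1 : 1 ∈ A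
  · obtain ⟨t, ht⟩ := pvFwd_ends_one A hA h1
    have hnb : -1 ∉ pvFwd A := not_barrier_pvFwd A hA
    have hnbt : -1 ∉ t.reverse := by
      intro h
      exact hnb (by rw [ht]; exact List.mem_append_left _ (List.mem_reverse.mp h))
    have hrev : (pvFwd A).reverse = 1 :: t.reverse := by simp [ht]
    have hlen : (pvFwd A).length = t.length + 1 := by simp [ht]
    have hc : (pvFwd A).contains 1 = true := by
      simp [ht]
    rw [hrev, show pvFwd (1 :: t.reverse) = 1 :: pvGo 1 t.reverse from rfl,
      pvGo_one_of_no_barrier t.reverse hnbt]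
    simp only [pvFlush, hc, if_true, hlen]
    simp [List.replicate_succ']
  · have hfA : pvFwd A = A := pvFwd_of_no_one A h1
    have h1r : 1 ∉ A.reverse := fun h => h1 (List.mem_reverse.mp h)
    have hc : A.contains 1 = false := by simpa using h1
    rw [hfA, pvFwd_of_no_one A.reverse h1r, List.reverse_reverse]
    simp only [pvFlush, hc, Bool.false_eq_true, if_false]

theorem barrier_split (l : List Int) (h : -1 ∈ l) :
    ∃ A B, l = A ++ -1 :: B ∧ -1 ∉ A := by
  induction l with
  | nil => simp at h
  | cons x xs ih =>
    by_cases hx : x = -1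
    · exact ⟨[], xs, by simp [hx], by simp⟩
    · have hxs : -1 ∈ xs := by
        rcases List.mem_cons.mp h with h1 | h1
        · exact absurd h1.symm hx
        · exact h1
      obtain ⟨A, B, hAB, hA⟩ := ih hxs
      exact ⟨x :: A, B, by simp [hAB], by
        simp only [List.mem_cons, not_or]
        exact ⟨fun hh => hx hh.symm, hA⟩⟩

theorem main_eq : ∀ (n : Nat) (l : List Int), l.length ≤ n →
    (pvFwd ((pvFwd l).reverse)).reverse = pvFill [] (pvFwd l) := by
  intro n
  induction n with
  | zero =>
    intro l hl
    have : l = [] := List.eq_nil_of_length_eq_zero (Nat.le_zero.mp hl)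
    subst this
    simp [pvFwd, pvFill, pvFlush]
  | succ n ih =>
    intro l hl
    by_cases hb : -1 ∈ l
    · obtain ⟨A, B, rfl, hA⟩ := barrier_split l hb
      have hBlen : B.length ≤ n := by
        have := hl
        simp [List.length_append] at this
        omega
      have hfwd : pvFwd (A ++ -1 :: B) = pvFwd A ++ -1 :: pvFwd B :=
        pvFwd_append_neg_one A B
      rw [hfwd]
      have hrev1 : (pvFwd A ++ -1 :: pvFwd B).reverse
          = (pvFwd B).reverse ++ -1 :: (pvFwd A).reverse := by
        simp
      rw [hrev1, pvFwd_append_neg_one]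
      have hrev2 : (pvFwd ((pvFwd B).reverse) ++ -1 :: pvFwd ((pvFwd A).reverse)).reverse
          = (pvFwd ((pvFwd A).reverse)).reverse ++ -1 :: (pvFwd ((pvFwd B).reverse)).reverse := by
        simp
      rw [hrev2, segment_lemma A hA, ih B hBlen]
      rw [pvFill_append_neg_one (pvFwd A) [] (pvFwd B) (not_barrier_pvFwd A hA)]
      simp
    · rw [pvFill_no_barrier (pvFwd l) [] (not_barrier_pvFwd l hb), List.nil_append]
      exact segment_lemma l hb

-- ===== VERDICT (by name: the statement is the Claim_ definition above) =====
theorem propaga2_spec : Claim_equal_propaga2 := by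
  intro lista _
  unfold Spec_propaga2
  rw [propaga2_eq, propaga2_alt_eq]
  exact main_eq lista.length lista (le_refl _)
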